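-- pv_equiv track=rewrite | github.com/SynKolbasyn/School | Lesson_01_09_2023/src/Task_20.py | solution
-- ===== SOURCE A (Python) =====
-- def solution(string: str) -> str:
-- 	result = ""
-- 	old_char = ""
-- 	for i in string:
-- 		if (i != old_char) and (old_char != ""):
-- 			result += " "
-- 		result += i
-- 		old_char = i
-- 	return result
-- ===== SOURCE B (Python) =====
-- def solution(string: str) -> str:
--     # Group the string into maximal runs of equal characters, then join the runs
--     # with single spaces.
--     runs = []
--     i = 0
--     n = len(string)
--     while i < n:
--         j = i + 1
--         while j < n and string[j] == string[i]:
--             j += 1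
--         runs.append(string[i:j])
--         i = j
--     return " ".join(runs)
-- ===== Notes on version B (the rewrite author's own statement) =====
-- stated objective: alternative
-- what changed: Replaces the char-by-char scan with old_char state and per-character space insertion by grouping the string into maximal runs of equal characters and joining the runs with single spaces.
import Mathlib
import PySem

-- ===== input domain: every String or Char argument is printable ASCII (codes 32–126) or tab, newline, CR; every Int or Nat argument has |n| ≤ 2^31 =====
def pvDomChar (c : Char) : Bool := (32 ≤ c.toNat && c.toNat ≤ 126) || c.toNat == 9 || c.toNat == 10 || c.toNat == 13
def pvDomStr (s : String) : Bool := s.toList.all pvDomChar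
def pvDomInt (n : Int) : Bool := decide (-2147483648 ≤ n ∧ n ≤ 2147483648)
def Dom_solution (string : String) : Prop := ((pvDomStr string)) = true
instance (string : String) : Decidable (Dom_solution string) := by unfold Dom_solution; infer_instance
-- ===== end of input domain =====

-- B replaces A's old_char-state scan by recursive maximal-run splitting joined with spaces (alternative decomposition, same cost).

-- ===== PORT A =====
-- state = (result, old_char); old_char is "" initially, then the one-char string [c]
def solutionStep (st : List Char × List Char) (i : Char) : List Char × List Char :=
  let result := if [i] ≠ st.2 ∧ st.2 ≠ [] then st.1 ++ [' '] else st.1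
  (result ++ [i], [i])

def solution (string : String) : String :=
  String.ofList (string.toList.foldl solutionStep ([], [])).1

-- ===== PORT B =====
-- outer while loop: slice off the maximal run of the current character (takeWhile/dropWhile = the inner while + slice)
def solutionAltRuns : List Char → List (List Char)
  | [] => []
  | c :: cs => (c :: cs.takeWhile (· == c)) :: solutionAltRuns (cs.dropWhile (· == c))
termination_by l => l.length
decreasing_by
  simp only [List.length_cons]
  exact Nat.lt_succ_of_le (List.length_dropWhile_le _ _)

-- " ".join(runs)
def solutionJoin : List (List Char) → List Char
  | [] => []
  | [r] => r
  | r :: rs => r ++ ' ' :: solutionJoin rs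

def solution_alt (string : String) : String :=
  String.ofList (solutionJoin (solutionAltRuns string.toList))

-- ===== PRECONDITION & SPEC =====
def Spec_solution (string : String) (out : String) : Prop := out = solution_alt string
instance (string : String) (out : String) : Decidable (Spec_solution string out) := by unfold Spec_solution; infer_instance

-- ===== CLAIM (what is proved, stated in full; the proofs are below) =====
def Claim_equal_solution : Prop := ∀ (string : String), Dom_solution string → Spec_solution string (solution string)

-- ===== LEMMAS AND PROOFS =====

-- characterization of A's loop once a previous character o exists
def gRun (o : Char) : List Char → List Char
  | [] => []
  | c :: cs => (if c = o then [c] else [' ', c]) ++ gRun c cs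

lemma foldA (cs : List Char) : ∀ (acc : List Char) (o : Char),
    (cs.foldl solutionStep (acc, [o])).1 = acc ++ gRun o cs := by
  induction cs with
  | nil => intro acc o; simp [gRun]
  | cons c cs ih =>
      intro acc o
      by_cases h : c = o
      · subst h
        simp [List.foldl_cons, solutionStep, ih, gRun]
      · have hne : [c] ≠ [o] := by simpa using h
        simp [List.foldl_cons, solutionStep, hne, ih, gRun, h]

lemma joinRuns_cons_head (x : Char) (r : List Char) (rs : List (List Char)) :
    solutionJoin ((x :: r) :: rs) = x :: solutionJoin (r :: rs) := by
  cases rs <;> simp [solutionJoin]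

lemma join_runs (cs : List Char) : ∀ c,
    solutionJoin (solutionAltRuns (c :: cs)) = c :: gRun c cs := by
  induction cs with
  | nil => intro c; simp [solutionAltRuns, solutionJoin, gRun]
  | cons d cs ih =>
      intro c
      by_cases h : d = c
      · subst h
        rw [solutionAltRuns]
        simp only [List.takeWhile_cons, List.dropWhile_cons, beq_self_eq_true, if_true]
        rw [joinRuns_cons_head, ← solutionAltRuns, ih d]
        simp [gRun]
      · have hb : (d == c) = false := by simp [h]
        rw [solutionAltRuns]
        simp only [List.takeWhile_cons, List.dropWhile_cons, hb, Bool.false_eq_true, if_false]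
        rw [solutionAltRuns]
        rw [show ((c :: []) :: (d :: List.takeWhile (fun x => x == d) cs) ::
              solutionAltRuns (List.dropWhile (fun x => x == d) cs)) =
            (c :: []) :: solutionAltRuns (d :: cs) from by rw [solutionAltRuns]]
        rw [joinRuns_cons_head]
        have hne : solutionAltRuns (d :: cs) ≠ [] := by rw [solutionAltRuns]; simp
        cases hrs : solutionAltRuns (d :: cs) with
        | nil => exact absurd hrs hne
        | cons r rs =>
            have := ih d
            rw [hrs] at this
            simp [solutionJoin, this, gRun, h]

lemma first_step (c : Char) : solutionStep (([] : List Char), ([] : List Char)) c = ([c], [c]) := by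
  simp [solutionStep]

-- ===== VERDICT (by name: the statement is the Claim_ definition above) =====
theorem solution_spec : Claim_equal_solution := by
  intro s _
  unfold Spec_solution solution solution_alt
  cases hs : s.toList with
  | nil => simp [solutionAltRuns, solutionJoin]
  | cons c cs =>
      rw [List.foldl_cons, first_step, foldA, join_runs]
      rfl
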